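-- pv_equiv track=rewrite | github.com/iagolarrondo/investigai-text-to-graph | src/app/entity_resolution.py | locate_mention_span
-- ===== SOURCE A (Python) =====
-- def locate_mention_span(question: str, mention: str) -> tuple[int, int] | None:
--     """
--     Find the mention inside the question.
--
--     Tries:
--     1) simple case-insensitive substring match
--     2) loose match ignoring non-alphanumeric characters (helps with punctuation/spacing differences)
--     """
--     q = question or ""
--     m = (mention or "").strip()
--     if not q or not m:
--         return None
--
--     q_lower = q.lower()
--     m_lower = m.lower()
--     idx = q_lower.find(m_lower)
--     if idx >= 0:
--         return idx, idx + len(m)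
--
--     # Loose match: compare only [a-z0-9] streams, but map back to original indices.
--     q_map: list[int] = []
--     q_simpl: list[str] = []
--     for i, ch in enumerate(q_lower):
--         if ch.isalnum():
--             q_map.append(i)
--             q_simpl.append(ch)
--     m_simpl = "".join(ch for ch in m_lower if ch.isalnum())
--     if not m_simpl:
--         return None
--     q_simpl_s = "".join(q_simpl)
--     j = q_simpl_s.find(m_simpl)
--     if j < 0:
--         return None
--     start = q_map[j]
--     end = q_map[j + len(m_simpl) - 1] + 1
--     return start, end
-- ===== SOURCE B (Python) =====
-- def _loose_match_end(q_lower, i, target):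
--     # Try matching target's chars from position i onward, skipping non-alnum.
--     k = 0
--     j = i
--     last = i
--     while k < len(target):
--         if j >= len(q_lower):
--             return None
--         ch = q_lower[j]
--         if ch.isalnum():
--             if ch != target[k]:
--                 return None
--             last = j
--             k += 1
--         j += 1
--     return last + 1
--
--
-- def locate_mention_span(question: str, mention: str) -> "tuple[int, int] | None":
--     q = question or ""
--     m = (mention or "").strip()
--     if not q or not m:
--         return None
--
--     q_lower = q.lower()
--     m_lower = m.lower()
--     idx = q_lower.find(m_lower)
--     if idx >= 0:
--         return idx, idx + len(m)
--
--     # Loose match: two-pointer scan over the original string, skipping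
--     # non-alphanumeric characters, instead of building simplified streams.
--     target = [ch for ch in m_lower if ch.isalnum()]
--     if not target:
--         return None
--     total = sum(1 for ch in q_lower if ch.isalnum())
--     seen = 0
--     for i, ch in enumerate(q_lower):
--         if not ch.isalnum():
--             continue
--         if total - seen < len(target):
--             # not enough alphanumeric characters remain anywhere onward
--             return None
--         end = _loose_match_end(q_lower, i, target)
--         if end is not None:
--             return i, end
--         seen += 1
--     return None
-- ===== Notes on version B (the rewrite author's own statement) =====
-- stated objective: alternative
-- what changed: The loose pass no longer builds the simplified alnum stream plus an index map and runs str.find on it; instead a direct two-pointer scan over the lowered question tries, at each alphanumeric position, to consume the mention's alphanumeric characters while skipping non-alphanumeric ones (returning early once too few alphanumeric characters remain), yielding original-index spans directly.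
import Mathlib
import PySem

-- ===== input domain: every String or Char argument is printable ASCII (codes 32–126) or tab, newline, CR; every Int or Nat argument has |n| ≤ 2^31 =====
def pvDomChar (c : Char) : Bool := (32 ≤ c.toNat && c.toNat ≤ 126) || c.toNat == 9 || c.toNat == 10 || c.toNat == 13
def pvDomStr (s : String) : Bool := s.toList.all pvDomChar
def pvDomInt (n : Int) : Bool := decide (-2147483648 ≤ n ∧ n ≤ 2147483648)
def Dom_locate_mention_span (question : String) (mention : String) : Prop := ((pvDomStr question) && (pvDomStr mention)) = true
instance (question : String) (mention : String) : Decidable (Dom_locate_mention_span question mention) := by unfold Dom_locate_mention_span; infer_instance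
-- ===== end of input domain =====

-- B replaces A's simplified-stream + index-map + find machinery for the loose pass by a
-- direct two-pointer scan over the original lowered string (objective: alternative).

-- ===== PORT A =====
def locate_mention_span (question : String) (mention : String) : Option (Int × Int) :=
  let q := question
  let m := PySem.Str.strip mention
  if q.toList.isEmpty || m.toList.isEmpty then none
  else
    let ql := PySem.Chars.lower q.toList
    let ml := PySem.Chars.lower m.toList
    let idx := PySem.Chars.find ql ml
    if 0 ≤ idx then some (idx, idx + (m.toList.length : Int))
    else
      let st := (PySem.List.enumerate ql 0).foldl
        (fun (acc : List Int × List Char) p =>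
          if PySem.Chars.isalnum p.2 then (acc.1 ++ [p.1], acc.2 ++ [p.2]) else acc) ([], [])
      let q_map := st.1
      let q_simpl := st.2
      let m_simpl := ml.filter (fun c => PySem.Chars.isalnum c)
      if m_simpl.isEmpty then none
      else
        let j := PySem.Chars.find q_simpl m_simpl
        if j < 0 then none
        else
          match PySem.List.pyGet? q_map j, PySem.List.pyGet? q_map (j + (m_simpl.length : Int) - 1) with
          | some s, some e => some (s, e + 1)
          | _, _ => none

-- ===== PORT B =====
-- _loose_match_end: consume target chars from the suffix, skipping non-alnum chars
def pvLooseEnd : List Char → Int → Char → List Char → Option Int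
  | [], _, _, _ => none
  | c :: rest, i, x, xs =>
    if PySem.Chars.isalnum c then
      if c = x then
        match xs with
        | [] => some (i + 1)
        | y :: ys => pvLooseEnd rest (i + 1) y ys
      else none
    else pvLooseEnd rest (i + 1) x xs

-- the 'for i, ch in enumerate(q_lower)' loop with its early returns
-- (seen = alnum chars already passed, total = alnum chars in the whole string)
def pvBScan : List Char → Int → Int → Int → Char → List Char → Option (Int × Int)
  | [], _, _, _, _, _ => none
  | c :: rest, i, seen, total, x, xs =>
    if PySem.Chars.isalnum c then
      if total - seen < (xs.length + 1 : Int) then none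
      else
        match pvLooseEnd (c :: rest) i x xs with
        | some e => some (i, e)
        | none => pvBScan rest (i + 1) (seen + 1) total x xs
    else pvBScan rest (i + 1) seen total x xs

def locate_mention_span_alt (question : String) (mention : String) : Option (Int × Int) :=
  let q := question
  let m := PySem.Str.strip mention
  if q.toList.isEmpty || m.toList.isEmpty then none
  else
    let ql := PySem.Chars.lower q.toList
    let ml := PySem.Chars.lower m.toList
    let idx := PySem.Chars.find ql ml
    if 0 ≤ idx then some (idx, idx + (m.toList.length : Int))
    else
      match ml.filter (fun c => PySem.Chars.isalnum c) with
      | [] => none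
      | x :: xs =>
        let total := (ql.countP (fun c => PySem.Chars.isalnum c) : Int)
        pvBScan ql 0 0 total x xs

-- ===== PRECONDITION & SPEC =====
def Spec_locate_mention_span (question : String) (mention : String) (out : Option (Int × Int)) : Prop := out = locate_mention_span_alt question mention
instance (question : String) (mention : String) (out : Option (Int × Int)) : Decidable (Spec_locate_mention_span question mention out) := by unfold Spec_locate_mention_span; infer_instance

-- ===== CLAIM (what is proved, stated in full; the proofs are below) =====
def Claim_equal_locate_mention_span : Prop := ∀ (question : String) (mention : String), Dom_locate_mention_span question mention → Spec_locate_mention_span question mention (locate_mention_span question mention)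

-- ===== LEMMAS AND PROOFS =====

-- the alnum positions of s, with their original indices, starting at offset i
def pvFP : List Char → Int → List (Int × Char)
  | [], _ => []
  | c :: rest, i =>
    if PySem.Chars.isalnum c then (i, c) :: pvFP rest (i + 1) else pvFP rest (i + 1)

lemma pvFP_eq_filter_enumerate (s : List Char) (i : Int) :
    pvFP s i = (PySem.List.enumerate s i).filter (fun p => PySem.Chars.isalnum p.2) := by
  induction s generalizing i with
  | nil => simp [pvFP, PySem.List.enumerate_nil]
  | cons c rest ih =>
    simp only [pvFP, PySem.List.enumerate_cons, List.filter_cons]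
    by_cases h : PySem.Chars.isalnum c <;> simp [h, ih]

-- matchEnd over the filtered pair list
def pvME : List (Int × Char) → Char → List Char → Option Int
  | [], _, _ => none
  | (k, c) :: ps, x, xs =>
    if c = x then
      match xs with
      | [] => some (k + 1)
      | y :: ys => pvME ps y ys
    else none

def pvPScan : List (Int × Char) → Char → List Char → Option (Int × Int)
  | [], _, _ => none
  | (k, c) :: ps, x, xs =>
    match pvME ((k, c) :: ps) x xs with
    | some e => some (k, e)
    | none => pvPScan ps x xs

lemma pvLooseEnd_eq_pvME (s : List Char) (i : Int) (x : Char) (xs : List Char) :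
    pvLooseEnd s i x xs = pvME (pvFP s i) x xs := by
  induction s generalizing i x xs with
  | nil => simp [pvLooseEnd, pvFP, pvME]
  | cons c rest ih =>
    by_cases h : PySem.Chars.isalnum c
    · simp only [pvLooseEnd, pvFP, h, if_pos, pvME]
      by_cases hx : c = x
      · cases xs with
        | nil => simp [hx]
        | cons y ys => simp [hx, ih]
      · simp [hx]
    · simp [pvLooseEnd, pvFP, h, ih]

-- pvME succeeds iff the target is a prefix of the char stream, with the stated end
lemma pvME_of_prefix (ps : List (Int × Char)) (x : Char) (xs : List Char)
    (h : (x :: xs) <+: ps.map Prod.snd) :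
    ∃ hlt : xs.length < ps.length, pvME ps x xs = some ((ps[xs.length]'hlt).1 + 1) := by
  induction ps generalizing x xs with
  | nil => simp at h
  | cons p ps ih =>
    obtain ⟨k, c⟩ := p
    simp only [List.map_cons, List.cons_prefix_cons] at h
    obtain ⟨hc, hxs⟩ := h
    cases xs with
    | nil =>
      refine ⟨by simp, ?_⟩
      simp [pvME, hc.symm]
    | cons y ys =>
      obtain ⟨hlt, hme⟩ := ih y ys hxs
      refine ⟨by simpa using Nat.succ_lt_succ hlt, ?_⟩
      simp [pvME, hc.symm, hme]

lemma pvME_of_not_prefix (ps : List (Int × Char)) (x : Char) (xs : List Char)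
    (h : ¬ (x :: xs) <+: ps.map Prod.snd) : pvME ps x xs = none := by
  induction ps generalizing x xs with
  | nil => rfl
  | cons p ps ih =>
    obtain ⟨k, c⟩ := p
    simp only [List.map_cons, List.cons_prefix_cons, not_and_or] at h
    by_cases hc : c = x
    · cases xs with
      | nil =>
        exfalso
        rcases h with h | h
        · exact h hc.symm
        · exact h (List.nil_prefix)
      | cons y ys =>
        have hys : ¬ (y :: ys) <+: ps.map Prod.snd := by
          rcases h with h | h
          · exact absurd hc.symm h
          · exact h
        simp [pvME, hc, ih y ys hys]
    · simp [pvME, hc]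

lemma pvFP_length (s : List Char) (i : Int) :
    (pvFP s i).length = s.countP (fun c => PySem.Chars.isalnum c) := by
  induction s generalizing i with
  | nil => simp [pvFP]
  | cons c rest ih =>
    by_cases h : PySem.Chars.isalnum c <;> simp [pvFP, h, ih]

-- a target longer than the remaining alnum stream can never match
lemma pvPScan_of_short (ps : List (Int × Char)) (x : Char) (xs : List Char)
    (h : ps.length ≤ xs.length) : pvPScan ps x xs = none := by
  induction ps generalizing xs with
  | nil => rfl
  | cons p ps' ih =>
    obtain ⟨k, c⟩ := p
    have hnp : ¬ (x :: xs) <+: ((k, c) :: ps').map Prod.snd := by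
      intro hp
      have := hp.length_le
      simp at this h
      omega
    simp only [pvPScan, pvME_of_not_prefix _ _ _ hnp]
    exact ih xs (by simp at h ⊢; omega)

lemma pvBScan_eq_pvPScan (s : List Char) (i seen total : Int) (x : Char) (xs : List Char)
    (h : total = seen + ((pvFP s i).length : Int)) :
    pvBScan s i seen total x xs = pvPScan (pvFP s i) x xs := by
  induction s generalizing i seen with
  | nil => simp [pvBScan, pvFP, pvPScan]
  | cons c rest ih =>
    by_cases hc : PySem.Chars.isalnum c
    · simp only [pvBScan, pvFP, hc, if_pos] at h ⊢
      simp only [List.length_cons] at h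
      by_cases hg : total - seen < (xs.length + 1 : Int)
      · rw [if_pos hg]
        have hshort : ((i, c) :: pvFP rest (i + 1)).length ≤ xs.length := by
          simp; omega
        exact (pvPScan_of_short _ x xs hshort).symm
      · rw [if_neg hg]
        have hle := pvLooseEnd_eq_pvME (c :: rest) i x xs
        simp only [pvFP, hc, if_pos] at hle
        rw [hle]
        simp only [pvPScan]
        cases pvME ((i, c) :: pvFP rest (i + 1)) x xs with
        | some e => rfl
        | none => exact ih (i + 1) (seen + 1) (by push_cast at h ⊢; omega)
    · simp only [pvBScan, pvFP, hc, if_neg, Bool.false_eq_true, not_false_iff] at h ⊢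
      exact ih (i + 1) seen h

lemma pvPScan_of_none (ps : List (Int × Char)) (x : Char) (xs : List Char)
    (h : ∀ j : Nat, ¬ (x :: xs) <+: (ps.map Prod.snd).drop j) : pvPScan ps x xs = none := by
  induction ps with
  | nil => rfl
  | cons p ps ih =>
    obtain ⟨k, c⟩ := p
    have h0 : ¬ (x :: xs) <+: ((k, c) :: ps).map Prod.snd := by simpa using h 0
    simp only [pvPScan, pvME_of_not_prefix _ _ _ h0]
    exact ih (fun j => by simpa using h (j + 1))

lemma pvPScan_of_found (j : Nat) (ps : List (Int × Char)) (x : Char) (xs : List Char)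
    (hpre : (x :: xs) <+: (ps.map Prod.snd).drop j)
    (hmin : ∀ i : Nat, i < j → ¬ (x :: xs) <+: (ps.map Prod.snd).drop i) :
    ∃ hlt : j + xs.length < ps.length,
      pvPScan ps x xs = some ((ps[j]'(by omega)).1, (ps[j + xs.length]'hlt).1 + 1) := by
  induction j generalizing ps with
  | zero =>
    simp only [List.drop_zero] at hpre
    obtain ⟨hlt, hme⟩ := pvME_of_prefix ps x xs hpre
    cases ps with
    | nil => simp at hlt
    | cons p ps' =>
      obtain ⟨k, c⟩ := p
      refine ⟨by simpa using hlt, ?_⟩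
      simp only [pvPScan, hme]
      simp
  | succ j ih =>
    cases ps with
    | nil => simp at hpre
    | cons p ps' =>
      obtain ⟨k, c⟩ := p
      have h0 : ¬ (x :: xs) <+: ((k, c) :: ps').map Prod.snd := by
        simpa using hmin 0 (Nat.succ_pos j)
      have hpre' : (x :: xs) <+: (ps'.map Prod.snd).drop j := by
        simpa using hpre
      have hmin' : ∀ i : Nat, i < j → ¬ (x :: xs) <+: (ps'.map Prod.snd).drop i := by
        intro i hi
        simpa using hmin (i + 1) (by omega)
      obtain ⟨hlt, hps⟩ := ih ps' hpre' hmin'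
      refine ⟨by simp only [List.length_cons]; omega, ?_⟩
      simp only [pvPScan, pvME_of_not_prefix _ _ _ h0, hps]
      simp [Nat.succ_add]

-- A's two-accumulator append loop over the enumerated chars, in closed form
lemma pvFoldl_eq (l : List (Int × Char)) (a : List Int) (b : List Char) :
    l.foldl (fun (acc : List Int × List Char) p =>
        if PySem.Chars.isalnum p.2 then (acc.1 ++ [p.1], acc.2 ++ [p.2]) else acc) (a, b)
      = (a ++ (l.filter (fun p => PySem.Chars.isalnum p.2)).map Prod.fst,
         b ++ (l.filter (fun p => PySem.Chars.isalnum p.2)).map Prod.snd) := by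
  induction l generalizing a b with
  | nil => simp
  | cons p l ih =>
    by_cases h : PySem.Chars.isalnum p.2 <;>
      simp [List.foldl_cons, h, ih]

-- the loose pass of A, expressed over the filtered pair list, equals pvPScan
lemma pvLoose_eq (ps : List (Int × Char)) (x : Char) (xs : List Char) :
    (let j := PySem.Chars.find (ps.map Prod.snd) (x :: xs);
     if j < 0 then none
     else
       match PySem.List.pyGet? (ps.map Prod.fst) j,
             PySem.List.pyGet? (ps.map Prod.fst) (j + ((x :: xs).length : Int) - 1) with
       | some s, some e => some (s, e + 1)
       | _, _ => (none : Option (Int × Int)))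
    = pvPScan ps x xs := by
  by_cases hneg : PySem.Chars.find (ps.map Prod.snd) (x :: xs) < 0
  · have hm1 : PySem.Chars.find (ps.map Prod.snd) (x :: xs) = -1 := by
      have := PySem.Chars.neg_one_le_find (s := ps.map Prod.snd) (sub := x :: xs)
      omega
    have hinf : ¬ (x :: xs) <:+: ps.map Prod.snd :=
      (PySem.Chars.find_eq_neg_one_iff _ _).mp hm1
    have hall : ∀ j : Nat, ¬ (x :: xs) <+: (ps.map Prod.snd).drop j := by
      intro j hj
      exact hinf ((PySem.Chars.isIn_iff_infix _ _).mp
        ((PySem.Chars.exists_prefix_drop_iff_isIn _ _).mp ⟨j, hj⟩))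
    simp [hneg, pvPScan_of_none ps x xs hall]
  · have h0 : 0 ≤ PySem.Chars.find (ps.map Prod.snd) (x :: xs) := by omega
    obtain ⟨hpre, hmin⟩ := PySem.Chars.find_spec (s := ps.map Prod.snd) (sub := x :: xs) h0
    obtain ⟨hlt, hps⟩ := pvPScan_of_found ((PySem.Chars.find (ps.map Prod.snd) (x :: xs)).toNat)
      ps x xs hpre hmin
    set jn := (PySem.Chars.find (ps.map Prod.snd) (x :: xs)).toNat with hjn
    have hj : ((jn : Int)) = PySem.Chars.find (ps.map Prod.snd) (x :: xs) :=
      Int.toNat_of_nonneg h0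
    have hj1 : jn < ps.length := by omega
    have hget1 : PySem.List.pyGet? (ps.map Prod.fst) (PySem.Chars.find (ps.map Prod.snd) (x :: xs))
        = some ((ps[jn]'hj1).1) := by
      rw [← hj, PySem.List.pyGet?_natCast]
      simp [List.getElem?_map, List.getElem?_eq_getElem hj1]
    have hidx2 : PySem.Chars.find (ps.map Prod.snd) (x :: xs) + ((x :: xs).length : Int) - 1
        = ((jn + xs.length : Nat) : Int) := by
      rw [← hj]; push_cast; simp; omega
    have hget2 : PySem.List.pyGet? (ps.map Prod.fst)
        (PySem.Chars.find (ps.map Prod.snd) (x :: xs) + ((x :: xs).length : Int) - 1)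
        = some ((ps[jn + xs.length]'hlt).1) := by
      rw [hidx2, PySem.List.pyGet?_natCast]
      simp [List.getElem?_map, List.getElem?_eq_getElem hlt]
    simp only [hneg, if_false, hget1, hget2, hps]
    rfl

-- ===== VERDICT (by name: the statement is the Claim_ definition above) =====
theorem locate_mention_span_spec : Claim_equal_locate_mention_span := by
  intro question mention _
  unfold Spec_locate_mention_span
  simp only [locate_mention_span, locate_mention_span_alt]
  by_cases h1 : (question.toList.isEmpty || (PySem.Str.strip mention).toList.isEmpty) = true
  · rw [if_pos h1, if_pos h1]
  · rw [if_neg h1, if_neg h1]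
    by_cases h2 : 0 ≤ PySem.Chars.find (PySem.Chars.lower question.toList)
        (PySem.Chars.lower (PySem.Str.strip mention).toList)
    · rw [if_pos h2, if_pos h2]
    · rw [if_neg h2, if_neg h2, pvFoldl_eq]
      cases hms : (PySem.Chars.lower (PySem.Str.strip mention).toList).filter
          (fun c => PySem.Chars.isalnum c) with
      | nil => simp
      | cons x xs =>
        simp only [List.isEmpty_cons, Bool.false_eq_true, if_false, List.nil_append]
        rw [pvBScan_eq_pvPScan _ _ _ _ _ _ (by rw [pvFP_length]; omega),
          ← pvFP_eq_filter_enumerate]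
        exact pvLoose_eq (pvFP (PySem.Chars.lower question.toList) 0) x xs
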